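-- pv_equiv track=rewrite | github.com/evanmalexandre/DMZ-IDS-DailyReport | make_pdf_report.py | gen_priority_colors
-- ===== SOURCE A (Python) =====
-- def gen_priority_colors(priorities):
--     colors = []
--     for priority in priorities:
--         if priority >= 8:
--             colors.append('r')
--         elif priority >= 5:
--             colors.append('y')
--         else:
--             colors.append('g')
--     return colors
-- ===== SOURCE B (Python) =====
-- def gen_priority_colors(priorities):
--     # staged overwrite passes: start all green, then upgrade warnings, then criticals
--     colors = ['g'] * len(priorities)
--     for i, p in enumerate(priorities):
--         if p >= 5:
--             colors[i] = 'y'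
--     for i, p in enumerate(priorities):
--         if p >= 8:
--             colors[i] = 'r'
--     return colors
-- ===== Notes on version B (the rewrite author's own statement) =====
-- stated objective: alternative
-- what changed: Replaced the single pass with a per-element if/elif chain by staged overwrite passes: pre-fill the whole result with 'g', then a pass upgrading indices with priority >= 5 to 'y', then a pass upgrading indices with priority >= 8 to 'r'.
import Mathlib
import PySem

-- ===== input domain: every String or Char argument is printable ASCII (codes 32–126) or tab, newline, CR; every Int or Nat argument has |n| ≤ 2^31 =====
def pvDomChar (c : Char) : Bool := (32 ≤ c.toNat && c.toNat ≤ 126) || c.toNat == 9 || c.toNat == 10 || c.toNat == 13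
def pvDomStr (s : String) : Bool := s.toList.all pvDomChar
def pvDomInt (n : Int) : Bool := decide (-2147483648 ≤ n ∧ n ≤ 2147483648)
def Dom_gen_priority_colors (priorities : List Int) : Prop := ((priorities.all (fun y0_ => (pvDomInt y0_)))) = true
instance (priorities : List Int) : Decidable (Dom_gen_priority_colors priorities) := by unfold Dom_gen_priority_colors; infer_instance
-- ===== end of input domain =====

-- B replaces A's single-pass if/elif chain by staged overwrite passes (fill 'g', overwrite >=5 with 'y', overwrite >=8 with 'r'); objective: alternative (same cost).


-- ===== PORT A =====
def gen_priority_colors (priorities : List Int) : List String :=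
  priorities.foldl (fun colors priority =>
    if priority ≥ 8 then colors ++ ["r"]
    else if priority ≥ 5 then colors ++ ["y"]
    else colors ++ ["g"]) []

-- ===== PORT B =====
def gen_priority_colors_alt (priorities : List Int) : List String :=
  (PySem.List.enumerate priorities).foldl
    (fun c ip => if ip.2 ≥ 8 then c.set ip.1.toNat "r" else c)
    ((PySem.List.enumerate priorities).foldl
      (fun c ip => if ip.2 ≥ 5 then c.set ip.1.toNat "y" else c)
      (List.replicate priorities.length "g"))

-- ===== PRECONDITION & SPEC =====
def Spec_gen_priority_colors (priorities : List Int) (out : List String) : Prop := out = gen_priority_colors_alt priorities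
instance (priorities : List Int) (out : List String) : Decidable (Spec_gen_priority_colors priorities out) := by unfold Spec_gen_priority_colors; infer_instance

-- ===== CLAIM (what is proved, stated in full; the proofs are below) =====
def Claim_equal_gen_priority_colors : Prop := ∀ (priorities : List Int), Dom_gen_priority_colors priorities → Spec_gen_priority_colors priorities (gen_priority_colors priorities)

-- ===== LEMMAS AND PROOFS =====

-- one overwrite pass over an enumerated list is a zipWith of the condition over the old contents
theorem pass_eq (cond : Int → Prop) [DecidablePred cond] (v : String) :
    ∀ (xs : List Int) (A B : List String), B.length = xs.length →
    (PySem.List.enumerate xs (A.length : Int)).foldl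
      (fun c ip => if cond ip.2 then c.set ip.1.toNat v else c) (A ++ B)
    = A ++ xs.zipWith (fun p b => if cond p then v else b) B := by
  intro xs
  induction xs with
  | nil => intro A B h; simp at h; simp [h, PySem.List.enumerate]
  | cons x xs ih =>
    intro A B h
    cases B with
    | nil => simp at h
    | cons b B' =>
      simp only [PySem.List.enumerate_cons, List.foldl_cons, List.zipWith]
      have step : (if cond x then (A ++ b :: B').set ((A.length : Int)).toNat v else A ++ b :: B')
          = (A ++ [if cond x then v else b]) ++ B' := by
        split_ifs with hc <;> simp
      rw [step]
      have hlen : ((A.length : Int) + 1) = (((A ++ [if cond x then v else b]).length : Int)) := by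
        simp
      rw [hlen, ih (A ++ [if cond x then v else b]) B' (by simpa using h)]
      simp

theorem zipWith_map_self {α β γ : Type} (f : α → β → γ) (g : α → β) (xs : List α) :
    xs.zipWith f (xs.map g) = xs.map (fun p => f p (g p)) := by
  induction xs with
  | nil => rfl
  | cons x xs ih => simp [ih]

theorem gen_pc_a_eq_map (priorities : List Int) :
    gen_priority_colors priorities
      = priorities.map (fun p => if p ≥ 8 then "r" else if p ≥ 5 then "y" else "g") := by
  unfold gen_priority_colors
  have hbody : (fun (colors : List String) (priority : Int) =>
      if priority ≥ 8 then colors ++ ["r"]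
      else if priority ≥ 5 then colors ++ ["y"]
      else colors ++ ["g"])
    = fun colors priority => colors ++
        [if priority ≥ 8 then "r" else if priority ≥ 5 then "y" else "g"] := by
    funext colors p; split_ifs <;> rfl
  rw [hbody, PySem.List.foldl_append_singleton_eq_map, List.nil_append]

theorem gen_pc_eq (priorities : List Int) :
    gen_priority_colors priorities = gen_priority_colors_alt priorities := by
  rw [gen_pc_a_eq_map]
  unfold gen_priority_colors_alt
  have hrep : List.replicate priorities.length "g" = priorities.map (fun _ => "g") := by
    simp
  have h0 : ((0 : Int)) = (((List.nil (α := String)).length : Int)) := by simp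
  rw [hrep]
  have h1 := pass_eq (fun p => p ≥ 5) "y" priorities [] (priorities.map (fun _ => "g"))
      (by simp)
  simp only [List.nil_append, List.length_nil, Nat.cast_zero] at h1
  rw [h1, zipWith_map_self]
  have h2 := pass_eq (fun p => p ≥ 8) "r" priorities []
      (priorities.map (fun p => if p ≥ 5 then "y" else "g")) (by simp)
  simp only [List.nil_append, List.length_nil, Nat.cast_zero] at h2
  rw [h2, zipWith_map_self]

-- ===== VERDICT (by name: the statement is the Claim_ definition above) =====
theorem gen_priority_colors_spec : Claim_equal_gen_priority_colors := by
  intro priorities _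
  exact gen_pc_eq priorities
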